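-- pv_equiv track=rewrite | github.com/jr198868/ML_US_ENERGY | ML_LCA/ML_LCA_STATISTICS.py | findlcaml
-- ===== SOURCE A (Python) =====
-- def is_sublist(list1, list2):
--     len1 = len(list1)
--     len2 = len(list2)
--
--     # Check if list1 is longer than list2
--     if len1 > len2:
--         return False
--
--     # Iterate through list2 using sliding window
--     for i in range(len2 - len1 + 1):
--         if set(list2[i:i+len1]) == set(list1):
--             return True
--
--     return False
--
-- def findlcaml(X_test_ml_y_pred_ml_list, data_list):
--     result = []
--     for i in X_test_ml_y_pred_ml_list:
--         for j in data_list: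
--             if is_sublist(i[:-1], j):
--                 item = j + [i[-1]]
--                 result.append(item)
--     return result
-- ===== SOURCE B (Python) =====
-- # B: instead of re-scanning every data row with per-window set comparisons for every X row,
-- # build (once per distinct prefix length k) the set of canonical window keys of each data
-- # row; each (i, j) test is then a single key lookup.
-- def _key(xs):
--     return tuple(sorted(set(xs)))
--
-- def _window_keys(row, k):
--     return {_key(row[t:t + k]) for t in range(len(row) - k + 1)}
--
-- def findlcaml(X_test_ml_y_pred_ml_list, data_list):
--     result = []
--     cache = {}  # prefix length k -> list of window-key sets, one per data row
--     for i in X_test_ml_y_pred_ml_list: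
--         prefix = i[:-1]
--         k = len(prefix)
--         keysets = cache.get(k)
--         if keysets is None:
--             keysets = [_window_keys(j, k) for j in data_list]
--             cache[k] = keysets
--         pk = _key(prefix)
--         for j, ks in zip(data_list, keysets):
--             if pk in ks:
--                 result.append(j + [i[-1]])
--     return result
-- ===== Notes on version B (the rewrite author's own statement) =====
-- stated objective: faster
-- what changed: Instead of re-scanning every data row with a per-window set build-and-compare for every X row, B indexes each data row once per distinct prefix length by the set of canonical keys tuple(sorted(set(window))) of its windows, so each (i, j) pair costs a single key lookup.
import Mathlib
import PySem

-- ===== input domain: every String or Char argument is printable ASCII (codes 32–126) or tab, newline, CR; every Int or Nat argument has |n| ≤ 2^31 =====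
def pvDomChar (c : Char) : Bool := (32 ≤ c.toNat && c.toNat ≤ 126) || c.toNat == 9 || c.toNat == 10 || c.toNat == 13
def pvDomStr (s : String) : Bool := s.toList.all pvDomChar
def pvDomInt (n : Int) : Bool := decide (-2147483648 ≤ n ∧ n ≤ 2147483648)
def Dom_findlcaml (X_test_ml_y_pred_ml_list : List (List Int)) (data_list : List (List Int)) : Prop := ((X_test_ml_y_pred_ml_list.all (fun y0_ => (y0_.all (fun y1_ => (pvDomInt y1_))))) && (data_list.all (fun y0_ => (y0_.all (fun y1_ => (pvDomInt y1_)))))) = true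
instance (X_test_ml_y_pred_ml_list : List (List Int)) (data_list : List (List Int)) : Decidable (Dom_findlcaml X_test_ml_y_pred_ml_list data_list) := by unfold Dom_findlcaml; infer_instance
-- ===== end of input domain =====

-- B indexes each data row's windows by a canonical key once per distinct prefix length,
-- so each (i, j) pair costs one key lookup instead of a per-window set comparison
-- (objective: faster).

-- ===== PORT A =====
-- is_sublist: sliding window, comparing set(list2[i:i+len1]) with set(list1) at each start.
def isSublist (list1 list2 : List Int) : Bool :=
  let len1 := PySem.List.len list1
  let len2 := PySem.List.len list2
  if len1 > len2 then false
  else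
    (PySem.List.pyRange 0 (len2 - len1 + 1) 1).any (fun i =>
      PySem.Set.equal
        (PySem.Set.ofList (PySem.List.slice list2 (some i) (some (i + len1))))
        (PySem.Set.ofList list1))

def findlcaml (X_test_ml_y_pred_ml_list : List (List Int)) (data_list : List (List Int)) : List (List Int) :=
  X_test_ml_y_pred_ml_list.foldl (fun result i =>
    data_list.foldl (fun result j =>
      if isSublist (PySem.List.slice i none (some (-1))) j then
        result ++ [j ++ [PySem.List.pyGetD i (-1) 0]]
      else result) result) []

-- ===== PORT B =====
-- _key: canonical representative of a list's element set (tuple(sorted(set(xs)))).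
def canonKey (xs : List Int) : List Int :=
  PySem.List.sorted (PySem.Set.ofList xs) (fun x => x) false

-- _window_keys: the set of canonical keys of all length-k windows of row.
def windowKeys (row : List Int) (k : Nat) : PySem.Set (List Int) :=
  PySem.Set.ofList
    ((PySem.List.pyRange 0 (PySem.List.len row - (k : Int) + 1) 1).map
      (fun t => canonKey (PySem.List.slice row (some t) (some (t + (k : Int))))))

def findlcaml_alt (X_test_ml_y_pred_ml_list : List (List Int)) (data_list : List (List Int)) : List (List Int) :=
  (X_test_ml_y_pred_ml_list.foldl
    (fun (acc : List (List Int) × PySem.Dict Int (List (List (List Int)))) i =>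
      let pre := PySem.List.slice i none (some (-1))
      let k := pre.length
      let cached := acc.2.get? (k : Int)
      let keysets := cached.getD (data_list.map (fun j => windowKeys j k))
      let cache' := if cached.isSome then acc.2 else acc.2.insert (k : Int) keysets
      let pk := canonKey pre
      ((data_list.zip keysets).foldl
        (fun result jk =>
          if PySem.Set.contains jk.2 pk then
            result ++ [jk.1 ++ [PySem.List.pyGetD i (-1) 0]]
          else result)
        acc.1,
       cache'))
    ([], PySem.Dict.empty)).1

-- ===== PRECONDITION & SPEC =====
-- Pre_ excludes exactly the inputs where the Python raises IndexError (both A and B do):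
-- an empty row in the first list together with a nonempty data_list reaches i[-1].
def Pre_findlcaml (X_test_ml_y_pred_ml_list : List (List Int)) (data_list : List (List Int)) : Prop :=
  data_list = [] ∨ ∀ i ∈ X_test_ml_y_pred_ml_list, i ≠ []
instance (X_test_ml_y_pred_ml_list : List (List Int)) (data_list : List (List Int)) : Decidable (Pre_findlcaml X_test_ml_y_pred_ml_list data_list) := by unfold Pre_findlcaml; infer_instance
def pvWitness_findlcaml : List (List Int) × List (List Int) := ([[1, 2, 0], [3, 1]], [[2, 1, 3], [1]])

def Spec_findlcaml (X_test_ml_y_pred_ml_list : List (List Int)) (data_list : List (List Int)) (out : List (List Int)) : Prop := out = findlcaml_alt X_test_ml_y_pred_ml_list data_list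
instance (X_test_ml_y_pred_ml_list : List (List Int)) (data_list : List (List Int)) (out : List (List Int)) : Decidable (Spec_findlcaml X_test_ml_y_pred_ml_list data_list out) := by unfold Spec_findlcaml; infer_instance

-- ===== CLAIM (what is proved, stated in full; the proofs are below) =====
def Claim_equal_findlcaml : Prop := ∀ (X_test_ml_y_pred_ml_list : List (List Int)) (data_list : List (List Int)), Dom_findlcaml X_test_ml_y_pred_ml_list data_list → Pre_findlcaml X_test_ml_y_pred_ml_list data_list → Spec_findlcaml X_test_ml_y_pred_ml_list data_list (findlcaml X_test_ml_y_pred_ml_list data_list)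

-- ===== LEMMAS AND PROOFS =====

-- Python's set(a) == set(b), as equality of the member finsets.
lemma setEq_iff_toFinset (a b : List Int) :
    PySem.Set.equal (PySem.Set.ofList a) (PySem.Set.ofList b) = true ↔ a.toFinset = b.toFinset := by
  rw [PySem.Set.equal_iff, Finset.ext_iff]
  simp [PySem.Set.mem_ofList]

-- the canonical key identifies exactly the element set
lemma canonKey_eq_iff (a b : List Int) :
    canonKey a = canonKey b ↔ a.toFinset = b.toFinset := by
  constructor
  · intro h
    ext z
    simp only [List.mem_toFinset]
    have ha : z ∈ a ↔ z ∈ canonKey a := by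
      rw [canonKey, PySem.List.mem_sorted, PySem.Set.mem_ofList]
    have hb : z ∈ b ↔ z ∈ canonKey b := by
      rw [canonKey, PySem.List.mem_sorted, PySem.Set.mem_ofList]
    rw [ha, h, hb]
  · intro h
    have hpa := PySem.List.sorted_ofList_pairwise_lt (xs := a)
    have hpb := PySem.List.sorted_ofList_pairwise_lt (xs := b)
    have hperm : (canonKey a).Perm (canonKey b) := by
      unfold canonKey
      rw [List.perm_ext_iff_of_nodup (hpa.imp ne_of_lt) (hpb.imp ne_of_lt)]
      intro z
      rw [PySem.List.mem_sorted, PySem.List.mem_sorted,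
          PySem.Set.mem_ofList, PySem.Set.mem_ofList, ← List.mem_toFinset, h, List.mem_toFinset]
    exact List.Perm.eq_of_pairwise (fun x y _ _ h1 h2 => le_antisymm h1 h2)
      (hpa.imp le_of_lt) (hpb.imp le_of_lt) hperm

-- A's per-pair window scan ⇔ B's key lookup
lemma key_lookup_eq (pre j : List Int) :
    isSublist pre j = PySem.Set.contains (windowKeys j pre.length) (canonKey pre) := by
  unfold isSublist windowKeys
  simp only [PySem.List.len_eq]
  by_cases hkn : (pre.length : Int) > (j.length : Int)
  · rw [if_pos hkn]
    rw [PySem.List.pyRange_one_eq_nil (by omega)]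
    rfl
  · rw [if_neg hkn]
    rw [Bool.eq_iff_iff, List.any_eq_true, PySem.Set.contains_iff, PySem.Set.mem_ofList,
        List.mem_map]
    constructor
    · rintro ⟨t, ht, hf⟩
      exact ⟨t, ht, (canonKey_eq_iff _ _).mpr ((setEq_iff_toFinset _ _).mp hf)⟩
    · rintro ⟨t, ht, hf⟩
      exact ⟨t, ht, (setEq_iff_toFinset _ _).mpr ((canonKey_eq_iff _ _).mp hf)⟩

lemma zip_map_self {α β : Type} (f : α → β) (l : List α) :
    l.zip (l.map f) = l.map (fun x => (x, f x)) := by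
  induction l with
  | nil => rfl
  | cons x xs ih => simp [ih]

-- one X row: B's lookup loop over (data, keysets) equals A's scan loop over data
lemma inner_eq (data : List (List Int)) (i : List Int) (acc : List (List Int)) :
    ((data.zip (data.map (fun j => windowKeys j (PySem.List.slice i none (some (-1))).length))).foldl
      (fun result jk =>
        if PySem.Set.contains jk.2 (canonKey (PySem.List.slice i none (some (-1)))) then
          result ++ [jk.1 ++ [PySem.List.pyGetD i (-1) 0]]
        else result)
      acc)
    = data.foldl
        (fun result j =>
          if isSublist (PySem.List.slice i none (some (-1))) j then
            result ++ [j ++ [PySem.List.pyGetD i (-1) 0]]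
          else result)
        acc := by
  rw [zip_map_self, List.foldl_map]
  congr 1
  funext result j
  rw [key_lookup_eq]

-- the cache only ever holds the window-key index of data_list for the stored length
lemma foldB_eq (data : List (List Int)) :
    ∀ (X : List (List Int)) (acc : List (List Int))
      (cache : PySem.Dict Int (List (List (List Int)))),
    (∀ (k : Nat) v, cache.get? (k : Int) = some v → v = data.map (fun j => windowKeys j k)) →
    ((X.foldl
      (fun (acc : List (List Int) × PySem.Dict Int (List (List (List Int)))) i =>
        let pre := PySem.List.slice i none (some (-1))
        let k := pre.length
        let cached := acc.2.get? (k : Int)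
        let keysets := cached.getD (data.map (fun j => windowKeys j k))
        let cache' := if cached.isSome then acc.2 else acc.2.insert (k : Int) keysets
        let pk := canonKey pre
        ((data.zip keysets).foldl
          (fun result jk =>
            if PySem.Set.contains jk.2 pk then
              result ++ [jk.1 ++ [PySem.List.pyGetD i (-1) 0]]
            else result)
          acc.1,
         cache'))
      (acc, cache)).1)
    = X.foldl
        (fun result i =>
          data.foldl
            (fun result j =>
              if isSublist (PySem.List.slice i none (some (-1))) j then
                result ++ [j ++ [PySem.List.pyGetD i (-1) 0]]
              else result)
            result)
        acc := by
  intro X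
  induction X with
  | nil => intro acc cache _; rfl
  | cons i rest ih =>
    intro acc cache hinv
    simp only [List.foldl_cons]
    rcases hc : cache.get? (((PySem.List.slice i none (some (-1))).length : Nat) : Int) with _ | v
    · -- cache miss: the freshly built index is stored; the invariant extends
      have hnew : ∀ (k : Nat) v,
          (cache.insert (((PySem.List.slice i none (some (-1))).length : Nat) : Int)
              (data.map (fun j => windowKeys j (PySem.List.slice i none (some (-1))).length))).get?
            (k : Int) = some v →
          v = data.map (fun j => windowKeys j k) := by
        intro k v hv
        by_cases hk : (k : Int) = (((PySem.List.slice i none (some (-1))).length : Nat) : Int)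
        · have hkk : k = (PySem.List.slice i none (some (-1))).length := by exact_mod_cast hk
          rw [hk, PySem.Dict.get?_insert_self] at hv
          rw [hkk]
          exact (Option.some.injEq _ _).mp hv |>.symm
        · rw [PySem.Dict.get?_insert_of_ne _ _ hk] at hv
          exact hinv k v hv
      simp only [Option.getD_none, Option.isSome_none, Bool.false_eq_true, if_false]
      rw [ih _ _ hnew, inner_eq]
    · -- cache hit: the stored value is the index
      have hv := hinv _ v hc
      simp only [Option.getD_some, Option.isSome_some, if_true]
      rw [hv, ih _ _ hinv, inner_eq]

theorem findlcaml_eq (X data : List (List Int)) : findlcaml X data = findlcaml_alt X data := by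
  unfold findlcaml findlcaml_alt
  rw [foldB_eq data X [] PySem.Dict.empty (by intro k v hv; rw [PySem.Dict.get?_empty] at hv; cases hv)]

-- ===== VERDICT (by name: the statement is the Claim_ definition above) =====
theorem findlcaml_spec : Claim_equal_findlcaml := by
  intro X data _ _
  unfold Spec_findlcaml
  exact (findlcaml_eq X data).symm ▸ rfl
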